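-- pv_equiv track=rewrite | github.com/PHMD/fussball-gpt | data_aggregator.py | _format_injuries
-- ===== SOURCE A (Python) =====
-- def _format_injuries(injuries: dict[str, list]) -> str:
--     """Format injury/suspension data for LLM context."""
--     if not injuries:
--         return ""
--
--     lines = ["=== INJURIES & SUSPENSIONS ==="]
--     lines.append("")
--
--     # Sort teams alphabetically
--     sorted_teams = sorted(injuries.items())
--
--     for team_name, injury_list in sorted_teams:
--         if not injury_list:
--             continue
--
--         # Group by type (Injury vs Missing Roster/Suspension)
--         injuries_only = [i for i in injury_list if i.get("type") == "Injury"]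
--         other = [i for i in injury_list if i.get("type") != "Injury"]
--
--         players = []
--         for inj in injuries_only:
--             player = inj.get("player", "Unknown")
--             reason = inj.get("reason", "Unknown")
--             players.append(f"{player} ({reason})")
--
--         for inj in other:
--             player = inj.get("player", "Unknown")
--             reason = inj.get("reason", "Unknown")
--             players.append(f"{player} ({reason})")
--
--         if players:
--             lines.append(f"{team_name}: {', '.join(players[:5])}")  # Limit to 5 per team
--
--     if len(lines) == 2:  # Only header, no data
--         return ""
--
--     return "\n".join(lines)
-- ===== SOURCE B (Python) =====
-- def _entry(inj: dict) -> str: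
--     return f"{inj.get('player', 'Unknown')} ({inj.get('reason', 'Unknown')})"
--
--
-- def _format_injuries(injuries: dict[str, list]) -> str:
--     """Format injury/suspension data for LLM context."""
--     body = [
--         f"{team}: " + ", ".join(
--             _entry(i)
--             for i in sorted(lst, key=lambda i: i.get("type") != "Injury")[:5]
--         )
--         for team, lst in sorted(injuries.items())
--         if lst
--     ]
--     if not body:
--         return ""
--     return "\n".join(["=== INJURIES & SUSPENSIONS ===", ""] + body)
-- ===== Notes on version B (the rewrite author's own statement) =====
-- stated objective: idiomatic
-- what changed: Replaces the mutable lines accumulator, the two per-team filter passes with their concatenation, and the len(lines)==2 sentinel check by one list comprehension over the sorted teams with a single stable sort on the Injury-first key and a plain emptiness test.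
import Mathlib
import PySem

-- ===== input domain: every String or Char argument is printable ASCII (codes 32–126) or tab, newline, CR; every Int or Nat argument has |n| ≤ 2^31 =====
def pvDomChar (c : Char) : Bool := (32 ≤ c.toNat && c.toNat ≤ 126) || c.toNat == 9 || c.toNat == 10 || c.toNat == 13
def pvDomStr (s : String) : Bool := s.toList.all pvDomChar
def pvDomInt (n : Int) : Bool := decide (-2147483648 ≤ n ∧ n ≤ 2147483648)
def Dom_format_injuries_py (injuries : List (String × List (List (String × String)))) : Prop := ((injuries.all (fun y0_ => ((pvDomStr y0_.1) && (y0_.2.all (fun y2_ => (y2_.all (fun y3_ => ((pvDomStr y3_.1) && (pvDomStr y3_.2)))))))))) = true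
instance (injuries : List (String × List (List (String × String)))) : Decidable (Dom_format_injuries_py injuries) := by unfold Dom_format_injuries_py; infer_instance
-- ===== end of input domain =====

-- B replaces A's lines accumulator, two per-team filter passes and the len(lines)==2 sentinel
-- by one comprehension over the sorted teams with a single stable Injury-first sort (idiomatic; not faster).


-- shared by both ports: dict.get(k) (first match) and the f"{player} ({reason})" entry, identical text in both Pythons
def pvGetKey (i : List (String × String)) (k : String) : Option String :=
  (i.find? (fun p => p.1 == k)).map Prod.snd

def pvEntry (i : List (String × String)) : String :=
  ((pvGetKey i "player").getD "Unknown") ++ " (" ++ ((pvGetKey i "reason").getD "Unknown") ++ ")"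

-- ===== PORT A =====
def format_injuries_py (injuries : List (String × List (List (String × String)))) : String :=
  if injuries.isEmpty then "" else
  let lines : List String := ["=== INJURIES & SUSPENSIONS ==="] ++ [""]
  let sorted_teams := PySem.List.sorted injuries Prod.fst false
  let lines := sorted_teams.foldl (fun lines p =>
    if p.2.isEmpty then lines else
    let injuries_only := p.2.filter (fun i => pvGetKey i "type" == some "Injury")
    let other := p.2.filter (fun i => !(pvGetKey i "type" == some "Injury"))
    let players : List String := injuries_only.foldl (fun acc i => acc ++ [pvEntry i]) []
    let players := other.foldl (fun acc i => acc ++ [pvEntry i]) players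
    if players.isEmpty then lines
    else lines ++ [p.1 ++ ": " ++ PySem.Str.join ", " (PySem.List.slice players none (some 5))]) lines
  if lines.length = 2 then "" else PySem.Str.join "\n" lines

-- ===== PORT B =====
def format_injuries_py_alt (injuries : List (String × List (List (String × String)))) : String :=
  let body := ((PySem.List.sorted injuries Prod.fst false).filter (fun p => !p.2.isEmpty)).map
    (fun p => p.1 ++ ": " ++ PySem.Str.join ", "
      ((PySem.List.slice (PySem.List.sorted p.2 (fun i => !(pvGetKey i "type" == some "Injury")) false) none (some 5)).map pvEntry))
  if body.isEmpty then "" else PySem.Str.join "\n" ("=== INJURIES & SUSPENSIONS ===" :: "" :: body)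

-- ===== PRECONDITION & SPEC =====
def Spec_format_injuries_py (injuries : List (String × List (List (String × String)))) (out : String) : Prop := out = format_injuries_py_alt injuries
instance (injuries : List (String × List (List (String × String)))) (out : String) : Decidable (Spec_format_injuries_py injuries out) := by unfold Spec_format_injuries_py; infer_instance

-- ===== CLAIM (what is proved, stated in full; the proofs are below) =====
def Claim_equal_format_injuries_py : Prop := ∀ (injuries : List (String × List (List (String × String)))), Dom_format_injuries_py injuries → Spec_format_injuries_py injuries (format_injuries_py injuries)

-- ===== LEMMAS AND PROOFS =====

-- stable insertion into a partitioned (false-keys ++ true-keys) list, key = Bool viewed as 0/1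
theorem pv_insertBy_partition {α : Type} (f : α → Bool) (x : α) (A B : List α)
    (hA : ∀ a ∈ A, f a = false) (hB : ∀ b ∈ B, f b = true) :
    PySem.List.insertBy (fun a b => decide (f a < f b)) x (A ++ B) =
      if f x = false then A ++ x :: B else (A ++ B) ++ [x] := by
  induction A with
  | nil =>
    induction B with
    | nil => cases hfx : f x <;> simp [PySem.List.insertBy]
    | cons b bs ih =>
      have hb : f b = true := hB b (by simp)
      cases hfx : f x <;>
        simp_all [PySem.List.insertBy, Bool.lt_iff]
  | cons a as ih =>
    have ha : f a = false := hA a (by simp)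
    have h1 : ¬ (f x < f a) := by simp [ha, Bool.lt_iff]
    have := ih (fun a' ha' => hA a' (by simp [ha']))
    cases hfx : f x <;> simp_all [PySem.List.insertBy]

theorem pv_foldl_insertBy_partition {α : Type} (f : α → Bool) (xs A B : List α)
    (hA : ∀ a ∈ A, f a = false) (hB : ∀ b ∈ B, f b = true) :
    xs.foldl (fun acc x => PySem.List.insertBy (fun a b => decide (f a < f b)) x acc) (A ++ B) =
      (A ++ xs.filter (fun x => !f x)) ++ (B ++ xs.filter f) := by
  induction xs generalizing A B with
  | nil => simp
  | cons x xs ih =>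
    simp only [List.foldl_cons, pv_insertBy_partition f x A B hA hB]
    cases hfx : f x with
    | false =>
      have : A ++ x :: B = (A ++ [x]) ++ B := by simp
      rw [if_pos rfl, this, ih (A ++ [x]) B
        (by intro a ha; rcases List.mem_append.mp ha with h | h
            · exact hA a h
            · simp at h; subst h; exact hfx) hB]
      simp [hfx]
    | true =>
      rw [if_neg (by simp [hfx]), List.append_assoc,
        ih A (B ++ [x]) hA
        (by intro b hb; rcases List.mem_append.mp hb with h | h
            · exact hB b h
            · simp at h; subst h; exact hfx)]
      simp [hfx]

-- B's single stable sort on the Bool key is A's two filters concatenated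
theorem pv_sorted_bool {α : Type} (f : α → Bool) (xs : List α) :
    PySem.List.sorted xs (fun x => f x) false = xs.filter (fun x => !f x) ++ xs.filter f := by
  have := pv_foldl_insertBy_partition f xs [] [] (by simp) (by simp)
  simpa [PySem.List.sorted_eq_foldl_insertBy] using this

theorem pv_slice5_take {α : Type} (xs : List α) :
    PySem.List.slice xs none (some 5) = xs.take 5 := by
  rw [show (5 : Int) = ((5 : Nat) : Int) by norm_num, PySem.List.slice_to_natCast]

-- the per-team line A builds equals the one B builds, for every injury list
theorem pv_line_eq (l : List (List (String × String))) :
    PySem.List.slice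
        ((l.filter (fun i => !(pvGetKey i "type" == some "Injury"))).foldl (fun acc i => acc ++ [pvEntry i])
          ((l.filter (fun i => pvGetKey i "type" == some "Injury")).foldl (fun acc i => acc ++ [pvEntry i]) []))
        none (some 5) =
      (PySem.List.slice (PySem.List.sorted l (fun i => !(pvGetKey i "type" == some "Injury")) false) none (some 5)).map pvEntry := by
  simp only [PySem.List.foldl_append_singleton_eq_map, List.nil_append,
    pv_sorted_bool (fun i => !(pvGetKey i "type" == some "Injury")) l,
    Bool.not_not, pv_slice5_take, List.map_take, List.map_append]

-- the players list A accumulates is empty iff the team's injury list is empty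
theorem pv_players_len (l : List (List (String × String))) :
    ((l.filter (fun i => pvGetKey i "type" == some "Injury")).map pvEntry ++
      (l.filter (fun i => !(pvGetKey i "type" == some "Injury"))).map pvEntry).length = l.length := by
  have h := (List.filter_append_perm (fun i => pvGetKey i "type" == some "Injury") l).length_eq
  simpa using h

-- ===== VERDICT (by name: the statement is the Claim_ definition above) =====
theorem format_injuries_py_spec : Claim_equal_format_injuries_py := by
  intro injuries _
  unfold Spec_format_injuries_py format_injuries_py format_injuries_py_alt
  simp only []
  set S := PySem.List.sorted injuries Prod.fst false with hS
  set lineB := fun (p : String × List (List (String × String))) =>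
    p.1 ++ ": " ++ PySem.Str.join ", "
      ((PySem.List.slice (PySem.List.sorted p.2 (fun i => !(pvGetKey i "type" == some "Injury")) false) none (some 5)).map pvEntry)
    with hlineB
  have hstep : ∀ (acc : List String) (p : String × List (List (String × String))),
      (if p.2.isEmpty then acc else
        let injuries_only := p.2.filter (fun i => pvGetKey i "type" == some "Injury")
        let other := p.2.filter (fun i => !(pvGetKey i "type" == some "Injury"))
        let players : List String := injuries_only.foldl (fun acc i => acc ++ [pvEntry i]) []
        let players := other.foldl (fun acc i => acc ++ [pvEntry i]) players
        if players.isEmpty then acc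
        else acc ++ [p.1 ++ ": " ++ PySem.Str.join ", " (PySem.List.slice players none (some 5))]) =
      (if (fun q : String × List (List (String × String)) => !q.2.isEmpty) p then acc ++ [lineB p] else acc) := by
    intro acc p
    by_cases hp : p.2.isEmpty
    · simp [hp]
    · have hpe : p.2.isEmpty = false := by simpa using hp
      simp only [hpe, Bool.not_false, Bool.false_eq_true, if_false, if_true]
      have hne : p.2 ≠ [] := by simpa [List.isEmpty_iff] using hp
      have hplayers :
          (p.2.filter (fun i => !(pvGetKey i "type" == some "Injury"))).foldl (fun acc i => acc ++ [pvEntry i])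
            ((p.2.filter (fun i => pvGetKey i "type" == some "Injury")).foldl (fun acc i => acc ++ [pvEntry i]) [])
          = (p.2.filter (fun i => pvGetKey i "type" == some "Injury")).map pvEntry ++
            (p.2.filter (fun i => !(pvGetKey i "type" == some "Injury"))).map pvEntry := by
        rw [PySem.List.foldl_append_singleton_eq_map, PySem.List.foldl_append_singleton_eq_map,
          List.nil_append]
      simp only [hplayers]
      have hnonempty : ¬ (((p.2.filter (fun i => pvGetKey i "type" == some "Injury")).map pvEntry ++
            (p.2.filter (fun i => !(pvGetKey i "type" == some "Injury"))).map pvEntry).isEmpty) := by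
        rw [List.isEmpty_iff, ← List.length_eq_zero_iff, pv_players_len p.2, List.length_eq_zero_iff]
        exact hne
      rw [if_neg hnonempty, hlineB]
      have := pv_line_eq p.2
      simp only [hplayers] at this
      rw [this]
  have hfold : ∀ (init : List String),
      S.foldl (fun acc p =>
        if p.2.isEmpty then acc else
        let injuries_only := p.2.filter (fun i => pvGetKey i "type" == some "Injury")
        let other := p.2.filter (fun i => !(pvGetKey i "type" == some "Injury"))
        let players : List String := injuries_only.foldl (fun acc i => acc ++ [pvEntry i]) []
        let players := other.foldl (fun acc i => acc ++ [pvEntry i]) players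
        if players.isEmpty then acc
        else acc ++ [p.1 ++ ": " ++ PySem.Str.join ", " (PySem.List.slice players none (some 5))]) init =
      init ++ (S.filter (fun q => !q.2.isEmpty)).map lineB := by
    intro init
    rw [show (fun acc (p : String × List (List (String × String))) =>
        if p.2.isEmpty then acc else
        let injuries_only := p.2.filter (fun i => pvGetKey i "type" == some "Injury")
        let other := p.2.filter (fun i => !(pvGetKey i "type" == some "Injury"))
        let players : List String := injuries_only.foldl (fun acc i => acc ++ [pvEntry i]) []
        let players := other.foldl (fun acc i => acc ++ [pvEntry i]) players
        if players.isEmpty then acc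
        else acc ++ [p.1 ++ ": " ++ PySem.Str.join ", " (PySem.List.slice players none (some 5))])
        = (fun acc p => if (fun q : String × List (List (String × String)) => !q.2.isEmpty) p then acc ++ [lineB p] else acc) by
      funext acc p; exact hstep acc p]
    exact PySem.List.foldl_append_if _ lineB S init
  by_cases hinj : injuries.isEmpty
  · have : S = [] := by
      rw [hS, PySem.List.sorted_eq_nil_iff]
      simpa [List.isEmpty_iff] using hinj
    simp [hinj, this]
  · rw [if_neg hinj, hfold]
    by_cases hbody : ((S.filter (fun q => !q.2.isEmpty)).map lineB).isEmpty
    · rw [List.isEmpty_iff] at hbody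
      simp [hbody]
    · have hbody' : ((S.filter (fun q => !q.2.isEmpty)).map lineB) ≠ [] := by
        simpa [List.isEmpty_iff] using hbody
      have hL : (S.filter (fun q => !q.2.isEmpty)) ≠ [] := fun h => hbody' (by simp [h])
      have hlen2 : ¬ ((["=== INJURIES & SUSPENSIONS ==="] ++ [""] : List String) ++ (S.filter (fun q => !q.2.isEmpty)).map lineB).length = 2 := by
        simp only [List.length_append, List.length_cons, List.length_nil, List.length_map]
        have : (S.filter (fun q => !q.2.isEmpty)).length ≠ 0 := by
          simpa [List.length_eq_zero_iff] using hL
        omega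
      rw [if_neg hlen2, if_neg (by simpa [List.isEmpty_iff] using hbody')]
      rfl
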